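-- pv_equiv track=rewrite | github.com/msv-lab/HoarePrompt | useful_examples/tests_examples/program.py | cumulative_product
-- ===== SOURCE A (Python) =====
-- def cumulative_product(numbers):
--     total = 1
--     total_product=0
--     if len(numbers)==0:
--         return 0
--     for num in numbers:
--         if num != 0:
--             total *= num
--         else:
--             total_product += total
--             total = 1
--     return total_product +total
-- ===== SOURCE B (Python) =====
-- def _prod(seg):
--     p = 1
--     for x in seg:
--         p *= x
--     return p
--
-- def cumulative_product(numbers):
--     if not numbers:
--         return 0
--     segments = []
--     current = []
--     for num in numbers:
--         if num == 0:
--             segments.append(current)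
--             current = []
--         else:
--             current.append(num)
--     segments.append(current)
--     return sum(_prod(seg) for seg in segments)
-- ===== Notes on version B (the rewrite author's own statement) =====
-- stated objective: alternative
-- what changed: Instead of carrying two running scalars (current product and accumulated sum), B splits the list into zero-delimited segments in one pass and then sums each segment's product in a separate pass.
import Mathlib
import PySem

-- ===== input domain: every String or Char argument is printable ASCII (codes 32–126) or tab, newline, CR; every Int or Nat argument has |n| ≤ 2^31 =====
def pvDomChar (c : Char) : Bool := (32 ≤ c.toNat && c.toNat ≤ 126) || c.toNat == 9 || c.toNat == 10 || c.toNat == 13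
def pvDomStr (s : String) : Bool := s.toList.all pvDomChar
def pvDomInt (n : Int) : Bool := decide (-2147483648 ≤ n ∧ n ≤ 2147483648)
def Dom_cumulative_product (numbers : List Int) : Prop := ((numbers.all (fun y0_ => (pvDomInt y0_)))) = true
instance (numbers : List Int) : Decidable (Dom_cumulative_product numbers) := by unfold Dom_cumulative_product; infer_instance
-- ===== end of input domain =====

-- ===== PORT A =====
def cumulative_product (numbers : List Int) : Int :=
  if numbers.length = 0 then 0
  else
    let st := numbers.foldl (fun (st : Int × Int) num =>
      if num ≠ 0 then (st.1 * num, st.2) else (1, st.2 + st.1)) (1, 0)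
    st.2 + st.1

-- ===== PORT B =====
def pvProd (seg : List Int) : Int := seg.foldl (fun p x => p * x) 1

def cumulative_product_alt (numbers : List Int) : Int :=
  if numbers = [] then 0
  else
    let st := numbers.foldl (fun (st : List (List Int) × List Int) num =>
      if num = 0 then (st.1 ++ [st.2], ([] : List Int)) else (st.1, st.2 ++ [num]))
      (([] : List (List Int)), ([] : List Int))
    ((st.1 ++ [st.2]).map pvProd).sum

-- ===== PRECONDITION & SPEC =====
def Spec_cumulative_product (numbers : List Int) (out : Int) : Prop := out = cumulative_product_alt numbers
instance (numbers : List Int) (out : Int) : Decidable (Spec_cumulative_product numbers out) := by unfold Spec_cumulative_product; infer_instance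

-- ===== CLAIM (what is proved, stated in full; the proofs are below) =====
def Claim_equal_cumulative_product : Prop := ∀ (numbers : List Int), Dom_cumulative_product numbers → Spec_cumulative_product numbers (cumulative_product numbers)

-- ===== LEMMAS AND PROOFS =====
theorem pvProd_append_one (cur : List Int) (num : Int) :
    pvProd (cur ++ [num]) = pvProd cur * num := by
  simp [pvProd, List.foldl_append]

theorem loop_key : ∀ (numbers : List Int) (segs : List (List Int)) (cur : List Int),
    (let sa := numbers.foldl (fun (st : Int × Int) num =>
      if num ≠ 0 then (st.1 * num, st.2) else (1, st.2 + st.1)) (pvProd cur, (segs.map pvProd).sum)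
    let sb := numbers.foldl (fun (st : List (List Int) × List Int) num =>
      if num = 0 then (st.1 ++ [st.2], ([] : List Int)) else (st.1, st.2 ++ [num])) (segs, cur)
    sa.2 + sa.1 = ((sb.1 ++ [sb.2]).map pvProd).sum) := by
  intro numbers
  induction numbers with
  | nil => intro segs cur; simp
  | cons num rest ih =>
    intro segs cur
    by_cases h : num = 0
    · subst h
      simpa [pvProd, List.map_append] using ih (segs ++ [cur]) []
    · simpa [h, ← pvProd_append_one] using ih segs (cur ++ [num])

-- ===== VERDICT (by name: the statement is the Claim_ definition above) =====
theorem cumulative_product_spec : Claim_equal_cumulative_product := by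
  intro numbers _
  unfold Spec_cumulative_product cumulative_product cumulative_product_alt
  cases numbers with
  | nil => simp
  | cons num rest =>
    simpa [pvProd] using loop_key (num :: rest) [] []
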